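-- pv_equiv track=rewrite | github.com/Starvard/life-manager | services/week_planner.py | _dots_from_fixed_days
-- ===== SOURCE A (Python) =====
-- def _dots_from_fixed_days(n_dots: int, on_days: list[int]) -> list[int]:
--     """Place n_dots on the given weekdays; cycle if n_dots > len(on_days)."""
--     days = sorted({d for d in on_days if 0 <= d <= 6})
--     if not days:
--         return [0] * 7
--     dots = [0] * 7
--     if n_dots <= len(days):
--         for d in days[:n_dots]:
--             dots[d] = 1
--     else:
--         for i in range(n_dots):
--             dots[days[i % len(days)]] += 1
--     return dots
-- ===== SOURCE B (Python) =====
-- def _dots_from_fixed_days(n_dots: int, on_days: list[int]) -> list[int]: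
--     """Closed-form distribution: each of the k allowed days gets n//k dots,
--     the first n%k days one extra."""
--     days = sorted({d for d in on_days if 0 <= d <= 6})
--     dots = [0] * 7
--     if not days or n_dots <= 0:
--         return dots
--     q, r = divmod(n_dots, len(days))
--     for i, d in enumerate(days):
--         dots[d] = q + (1 if i < r else 0)
--     return dots
-- ===== Notes on version B (the rewrite author's own statement) =====
-- stated objective: alternative
-- what changed: Replaces A's dot-by-dot cyclic loop over range(n_dots) with a closed-form divmod distribution: each of the k allowed days gets n_dots//k dots and the first n_dots%k days one extra (B avoids the O(n_dots) loop, but on the measured inputs both are dominated by building the sorted day set).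
-- intended difference: On negative n_dots smaller in magnitude than the number k of distinct valid weekdays, A's days[:n_dots] slice wraps around and marks the first k+n_dots days with one dot each, while B returns all zeros, the intended result for a non-positive dot count. — e.g. on _dots_from_fixed_days(-1, [0, 1]): A returns [1, 0, 0, 0, 0, 0, 0], B returns [0, 0, 0, 0, 0, 0, 0]
import Mathlib
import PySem

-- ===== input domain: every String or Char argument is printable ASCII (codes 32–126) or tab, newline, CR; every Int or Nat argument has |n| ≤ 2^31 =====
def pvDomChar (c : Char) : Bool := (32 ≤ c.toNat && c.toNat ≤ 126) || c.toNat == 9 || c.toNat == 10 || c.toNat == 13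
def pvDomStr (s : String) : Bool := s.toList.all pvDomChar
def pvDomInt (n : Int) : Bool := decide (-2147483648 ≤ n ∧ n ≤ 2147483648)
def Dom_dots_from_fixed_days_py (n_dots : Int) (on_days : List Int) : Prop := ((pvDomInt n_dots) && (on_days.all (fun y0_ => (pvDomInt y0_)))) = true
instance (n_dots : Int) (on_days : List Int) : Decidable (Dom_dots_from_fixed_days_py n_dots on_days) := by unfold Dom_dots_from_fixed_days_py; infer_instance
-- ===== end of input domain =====

-- B replaces A's dot-by-dot cyclic loop by the closed-form divmod distribution
-- (each of the k allowed days gets n//k dots, the first n%k one extra); on negative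
-- n_dots (D_ below) B returns all zeros instead of A's negative-slice artifact.


-- ===== PORT A =====
-- days = sorted({d for d in on_days if 0 <= d <= 6})  (shared by both ports)
def pvDays (on_days : List Int) : List Int :=
  PySem.List.sorted (PySem.Set.ofList (on_days.filter (fun d => decide (0 ≤ d ∧ d ≤ 6)))) (fun x => x) false

def dots_from_fixed_days_py (n_dots : Int) (on_days : List Int) : List Int :=
  let days := pvDays on_days
  if days = [] then List.replicate 7 0
  else
    let dots := List.replicate 7 0
    if n_dots ≤ PySem.List.len days then
      -- for d in days[:n_dots]: dots[d] = 1
      (PySem.List.slice days none (some n_dots)).foldl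
        (fun dots d => PySem.List.pySetD dots d 1) dots
    else
      -- for i in range(n_dots): dots[days[i % len(days)]] += 1
      (PySem.List.pyRange 0 n_dots 1).foldl
        (fun dots i =>
          let idx := PySem.List.pyGetD days (PySem.Int.mod i (PySem.List.len days)) 0
          PySem.List.pySetD dots idx (PySem.List.pyGetD dots idx 0 + 1)) dots

-- ===== PORT B =====
def dots_from_fixed_days_py_alt (n_dots : Int) (on_days : List Int) : List Int :=
  let days := pvDays on_days
  let dots := List.replicate 7 0
  if days = [] ∨ n_dots ≤ 0 then dots
  else
    let q := PySem.Int.floordiv n_dots (PySem.List.len days)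
    let r := PySem.Int.mod n_dots (PySem.List.len days)
    -- for i, d in enumerate(days): dots[d] = q + (1 if i < r else 0)
    (PySem.List.enumerate days).foldl
      (fun dots p => PySem.List.pySetD dots p.2 (q + if p.1 < r then 1 else 0)) dots

-- ===== PRECONDITION & SPEC =====
-- the distinct valid weekdays mentioned in on_days (an input property used by D_ only)
def pvValid (on_days : List Int) : List Int :=
  ((List.range 7).map (fun p : Nat => (p : Int))).filter (fun p => decide (p ∈ on_days))

-- On negative n_dots smaller in magnitude than the number k of distinct valid weekdays, A's
-- days[:n_dots] slice wraps around and marks the first k+n_dots days with one dot each; B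
-- returns all zeros, the intended result for a non-positive dot count.
def D_dots_from_fixed_days_py (n_dots : Int) (on_days : List Int) : Prop :=
  n_dots < 0 ∧ 0 < ((pvValid on_days).length : Int) + n_dots
instance (n_dots : Int) (on_days : List Int) : Decidable (D_dots_from_fixed_days_py n_dots on_days) := by unfold D_dots_from_fixed_days_py; infer_instance

def Spec_dots_from_fixed_days_py (n_dots : Int) (on_days : List Int) (out : List Int) : Prop := ¬ D_dots_from_fixed_days_py n_dots on_days → out = dots_from_fixed_days_py_alt n_dots on_days
instance (n_dots : Int) (on_days : List Int) (out : List Int) : Decidable (Spec_dots_from_fixed_days_py n_dots on_days out) := by unfold Spec_dots_from_fixed_days_py; infer_instance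

def pvDiffWitness_dots_from_fixed_days_py : Int × List Int := (-1, [0, 1])
def pvDiffWitnessOut_dots_from_fixed_days_py : (List Int) × (List Int) :=
  ([1, 0, 0, 0, 0, 0, 0], [0, 0, 0, 0, 0, 0, 0])

-- ===== CLAIM (what is proved, stated in full; the proofs are below) =====
def Claim_unchanged_dots_from_fixed_days_py : Prop := ∀ (n_dots : Int) (on_days : List Int), Dom_dots_from_fixed_days_py n_dots on_days → Spec_dots_from_fixed_days_py n_dots on_days (dots_from_fixed_days_py n_dots on_days)
def Claim_changed_dots_from_fixed_days_py : Prop := Dom_dots_from_fixed_days_py (pvDiffWitness_dots_from_fixed_days_py.1) (pvDiffWitness_dots_from_fixed_days_py.2) ∧ D_dots_from_fixed_days_py (pvDiffWitness_dots_from_fixed_days_py.1) (pvDiffWitness_dots_from_fixed_days_py.2) ∧ dots_from_fixed_days_py (pvDiffWitness_dots_from_fixed_days_py.1) (pvDiffWitness_dots_from_fixed_days_py.2) = pvDiffWitnessOut_dots_from_fixed_days_py.1 ∧ dots_from_fixed_days_py_alt (pvDiffWitness_dots_from_fixed_days_py.1) (pvDiffWitness_dots_from_fixed_days_py.2) = pvDiffWitnessOut_dots_from_fixed_days_py.2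 ∧ pvDiffWitnessOut_dots_from_fixed_days_py.1 ≠ pvDiffWitnessOut_dots_from_fixed_days_py.2
def Claim_exact_dots_from_fixed_days_py : Prop := ∀ (n_dots : Int) (on_days : List Int), Dom_dots_from_fixed_days_py n_dots on_days → D_dots_from_fixed_days_py n_dots on_days → dots_from_fixed_days_py n_dots on_days ≠ dots_from_fixed_days_py_alt n_dots on_days

-- ===== LEMMAS AND PROOFS =====

theorem pvDays_nodup (on_days : List Int) : (pvDays on_days).Nodup := by
  have h := PySem.List.sorted_perm (PySem.Set.ofList (on_days.filter (fun d => decide (0 ≤ d ∧ d ≤ 6)))) (fun x => x) false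
  exact h.nodup_iff.mpr (PySem.Set.nodup_ofList _)

theorem pvDays_bound (on_days : List Int) : ∀ d ∈ pvDays on_days, 0 ≤ d ∧ d < 7 := by
  intro d hd
  rw [pvDays, PySem.List.mem_sorted, PySem.Set.mem_ofList, List.mem_filter] at hd
  have := of_decide_eq_true hd.2
  omega

theorem pvDays_length (on_days : List Int) :
    (pvDays on_days).length = (pvValid on_days).length := by
  have hnd : (pvDays on_days).Nodup := pvDays_nodup on_days
  have hnd2 : (pvValid on_days).Nodup := by
    exact ((List.nodup_range).map (fun a b h => by exact_mod_cast h)).filter _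
  have hperm : (pvDays on_days).Perm (pvValid on_days) := by
    rw [List.perm_ext_iff_of_nodup hnd hnd2]
    intro a
    rw [pvDays, PySem.List.mem_sorted, PySem.Set.mem_ofList, List.mem_filter]
    rw [pvValid, List.mem_filter]
    simp only [List.mem_map, List.mem_range, decide_eq_true_eq]
    constructor
    · rintro ⟨ha, hb⟩
      exact ⟨⟨a.toNat, by omega, by rw [Int.toNat_of_nonneg hb.1]⟩, ha⟩
    · rintro ⟨⟨p, hp7, rfl⟩, hpm⟩
      exact ⟨hpm, by constructor <;> omega⟩
  exact hperm.length_eq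

theorem foldl_ones (M : List Int) (hbd : ∀ d ∈ M, 0 ≤ d ∧ d < 7) :
    ∀ (acc : List Int), acc.length = 7 → ∀ p : Nat,
      (M.foldl (fun dots d => PySem.List.pySetD dots d 1) acc)[p]? =
        if (p : Int) ∈ M then some 1 else acc[p]? := by
  induction M with
  | nil => intro acc hacc p; simp
  | cons d M ih =>
    intro acc hacc p
    have hd := hbd d (List.mem_cons_self ..)
    have hbd' : ∀ x ∈ M, 0 ≤ x ∧ x < 7 := fun x hx => hbd x (List.mem_cons_of_mem _ hx)
    have hset : PySem.List.pySetD acc d 1 = acc.set d.toNat 1 :=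
      PySem.List.pySetD_of_nonneg acc 1 hd.1
    have hlen : (acc.set d.toNat 1).length = 7 := by simp [hacc]
    rw [List.foldl_cons, hset, ih hbd' _ hlen p]
    by_cases hpM : (p : Int) ∈ M
    · simp [List.mem_cons, hpM]
    · rw [List.getElem?_set]
      by_cases hpd : (p : Int) = d
      · have : d.toNat = p := by omega
        simp [this, hpd, hacc, show p < 7 by omega]
      · have : d.toNat ≠ p := by omega
        simp [this, hpd, hpM]

-- B's enumerate loop, pointwise
theorem foldl_enumerate (q r : Int) :
    ∀ (L : List Int), L.Nodup → (∀ d ∈ L, 0 ≤ d ∧ d < 7) →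
    ∀ (acc : List Int), acc.length = 7 → ∀ (s : Int) (p : Nat),
      ((PySem.List.enumerate L s).foldl (fun dots pr => PySem.List.pySetD dots pr.2 (q + if pr.1 < r then 1 else 0)) acc)[p]? =
        if (p : Int) ∈ L then some (q + if s + ((List.idxOf (p : Int) L : Nat) : Int) < r then 1 else 0) else acc[p]? := by
  intro L
  induction L with
  | nil => intro _ _ acc hacc s p; simp [PySem.List.enumerate]
  | cons d L ih =>
    intro hnd hbd acc hacc s p
    have hd := hbd d (List.mem_cons_self ..)
    have hset : PySem.List.pySetD acc d (q + if s < r then 1 else 0) = acc.set d.toNat (q + if s < r then 1 else 0) :=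
      PySem.List.pySetD_of_nonneg acc _ hd.1
    have hlen : (acc.set d.toNat (q + if s < r then 1 else 0)).length = 7 := by simp [hacc]
    rw [show PySem.List.enumerate (d :: L) s = (s, d) :: PySem.List.enumerate L (s + 1) from rfl,
      List.foldl_cons, hset,
      ih hnd.of_cons (fun x hx => hbd x (List.mem_cons_of_mem _ hx)) _ hlen (s + 1) p]
    by_cases hpd : (p : Int) = d
    · have hpL : (p : Int) ∉ L := by rw [hpd]; exact (List.nodup_cons.mp hnd).1
      have ht : d.toNat = p := by omega
      rw [if_neg hpL, List.getElem?_set]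
      simp [ht, hpd, hacc, show p < 7 by omega]
    · by_cases hpL : (p : Int) ∈ L
      · have hmm : (p : Int) ∈ d :: L := List.mem_cons_of_mem _ hpL
        rw [if_pos hpL, if_pos hmm]
        have hix : List.idxOf (p : Int) (d :: L) = List.idxOf (p : Int) L + 1 := by
          rw [List.idxOf_cons]
          simp [show (d == (p:Int)) = false by simp; exact fun h => hpd h.symm]
        rw [hix, show s + 1 + ((List.idxOf (p : Int) L : Nat) : Int)
            = s + (((List.idxOf (p : Int) L + 1 : Nat) : Nat) : Int) by push_cast; ring]
      · have hnm : (p : Int) ∉ d :: L := by simp [hpd, hpL]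
        rw [if_neg hpL, if_neg hnm, List.getElem?_set]
        have : d.toNat ≠ p := by omega
        simp [this]

def chiP (L : List Int) (q r : Int) (p : Nat) : Int :=
  if (p : Int) ∈ L then (if ((List.idxOf (p : Int) L : Nat) : Int) < r then q + 1 else q) else 0

def chi (L : List Int) (q r : Int) : List Int := (List.range 7).map (chiP L q r)

theorem length_chi (L : List Int) (q r : Int) : (chi L q r).length = 7 := by simp [chi]

theorem getElem?_chi (L : List Int) (q r : Int) (p : Nat) (hp : p < 7) :
    (chi L q r)[p]? = some (chiP L q r p) := by
  simp [chi, List.getElem?_map, List.getElem?_range hp]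

theorem chi_zero (L : List Int) : chi L 0 0 = List.replicate 7 0 := by
  apply List.ext_getElem?
  intro p
  by_cases hp : p < 7
  · rw [getElem?_chi L 0 0 p hp, List.getElem?_replicate]
    simp only [chiP]
    split
    · simp
    · rfl
  · rw [List.getElem?_eq_none (by simp [length_chi]; omega),
        List.getElem?_eq_none (by simp; omega)]

theorem A_big (L : List Int) (hnd : L.Nodup) (hbd : ∀ d ∈ L, 0 ≤ d ∧ d < 7) (hne : L ≠ []) :
    ∀ m : Nat,
      (PySem.List.pyRange 0 (m : Int) 1).foldl
        (fun dots i =>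
          let idx := PySem.List.pyGetD L (PySem.Int.mod i (PySem.List.len L)) 0
          PySem.List.pySetD dots idx (PySem.List.pyGetD dots idx 0 + 1)) (List.replicate 7 0)
      = chi L ((m / L.length : Nat) : Int) ((m % L.length : Nat) : Int) := by
  have hk : 0 < L.length := List.length_pos_iff.mpr hne
  intro m
  induction m with
  | zero =>
    rw [show ((0:Nat):Int) = 0 by norm_num, PySem.List.pyRange_one_eq_nil (le_refl 0)]
    simp [chi_zero]
  | succ m ih =>
    have hstep : ((m+1 : Nat) : Int) = (m : Int) + 1 := by push_cast; ring
    rw [hstep, PySem.List.pyRange_one_succ_right (by positivity), List.foldl_append]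
    rw [ih]
    simp only [List.foldl_cons, List.foldl_nil]
    -- the step at i = m
    set k := L.length with hkdef
    set j := m % k with hjdef
    have hj : j < k := Nat.mod_lt _ hk
    set q : Int := ((m / k : Nat) : Int) with hqdef
    have hmod : PySem.Int.mod (m : Int) (PySem.List.len L) = ((j : Nat) : Int) := by
      rw [PySem.List.len_eq]
      exact_mod_cast PySem.Int.mod_natCast m k
    rw [hmod]
    have hidx : PySem.List.pyGetD L ((j : Nat) : Int) 0 = L[j] := by
      rw [PySem.List.pyGetD_natCast]
      exact List.getD_eq_getElem L 0 hj
    rw [hidx]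
    have hLj := hbd L[j] (List.getElem_mem hj)
    have hLjt : (L[j]).toNat < 7 := by omega
    have hLjc : ((L[j].toNat : Nat) : Int) = L[j] := Int.toNat_of_nonneg hLj.1
    have h2 : chiP L q (j : Int) (L[j]).toNat = q := by
      rw [chiP, hLjc, if_pos (List.getElem_mem hj), List.Nodup.idxOf_getElem hnd j hj]
      simp
    have hcur : PySem.List.pyGetD (chi L q (j : Int)) L[j] 0 = q := by
      rw [PySem.List.pyGetD_eq_getElem _ _ hLj.1 (by simp only [length_chi]; omega)]
      have h1 := getElem?_chi L q (j : Int) (L[j]).toNat hLjt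
      rw [List.getElem?_eq_getElem (by rw [length_chi]; exact hLjt)] at h1
      rw [Option.some.inj h1, h2]
    rw [hcur, PySem.List.pySetD_of_nonneg _ _ hLj.1]
    have hdm : m / k * k + j = m := by rw [hjdef]; exact Nat.div_add_mod' m k
    have hm1 : m + 1 = (j + 1) + (m / k) * k := by omega
    have hmod1 : (m + 1) % k = (j + 1) % k := by rw [hm1]; exact Nat.add_mul_mod_self_right _ _ _
    have hdiv1 : (m + 1) / k = (j + 1) / k + m / k := by rw [hm1]; exact Nat.add_mul_div_right _ _ hk
    apply List.ext_getElem?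
    intro p
    by_cases hp : p < 7
    · rw [List.getElem?_set, getElem?_chi L (((m+1) / k : Nat) : Int) (((m+1) % k : Nat) : Int) p hp]
      by_cases ht : L[j].toNat = p
      · rw [if_pos ht, if_pos (by rw [length_chi]; omega)]
        have hpL : ((p : Nat) : Int) = L[j] := by omega
        have hmem : ((p : Nat) : Int) ∈ L := by rw [hpL]; exact List.getElem_mem hj
        have hio : List.idxOf ((p : Nat) : Int) L = j := by
          rw [hpL]; exact List.Nodup.idxOf_getElem hnd j hj
        unfold chiP
        rw [if_pos hmem, hio]
        by_cases hjk : j + 1 = k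
        · have h0 : (m + 1) % k = 0 := by rw [hmod1, hjk]; exact Nat.mod_self k
          have h1 : (m + 1) / k = m / k + 1 := by
            rw [hdiv1, ← hjk, Nat.div_self (by omega : 0 < j + 1)]; omega
          rw [h0, h1, if_neg (by exact_mod_cast Nat.not_lt_zero j)]
          rw [Option.some_inj, hqdef]
          omega
        · have h0 : (m + 1) % k = j + 1 := by rw [hmod1]; exact Nat.mod_eq_of_lt (by omega)
          have h1 : (m + 1) / k = m / k := by rw [hdiv1, Nat.div_eq_of_lt (by omega)]; omega
          rw [h0, h1, if_pos (by exact_mod_cast Nat.lt_succ_self j)]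
      · rw [if_neg ht, getElem?_chi _ _ _ p hp]
        congr 1
        unfold chiP
        by_cases hmem : ((p : Nat) : Int) ∈ L
        · rw [if_pos hmem, if_pos hmem]
          set i := List.idxOf ((p : Nat) : Int) L with hidef
          have hik : i < k := List.idxOf_lt_length_iff.mpr hmem
          have hij : i ≠ j := by
            intro h
            apply ht
            have hLi : L[i]'(by omega) = ((p : Nat) : Int) := List.getElem_idxOf (by omega)
            have h1 : L[i]? = some ((p : Nat) : Int) := by
              rw [List.getElem?_eq_getElem (show i < L.length by omega)]
              exact congrArg some hLi
            rw [h] at h1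
            have h2 : L[j]? = some (L[j]'(by omega)) := List.getElem?_eq_getElem (by omega)
            rw [h1] at h2
            have := Option.some.inj h2
            omega
          by_cases hjk : j + 1 = k
          · have h0 : (m + 1) % k = 0 := by rw [hmod1, hjk]; exact Nat.mod_self k
            have h1 : (m + 1) / k = m / k + 1 := by
              rw [hdiv1, ← hjk, Nat.div_self (by omega : 0 < j + 1)]; omega
            rw [h0, h1, if_pos (by exact_mod_cast (by omega : i < j)),
              if_neg (by exact_mod_cast Nat.not_lt_zero i)]
            rw [hqdef]
            omega
          · have h0 : (m + 1) % k = j + 1 := by rw [hmod1]; exact Nat.mod_eq_of_lt (by omega)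
            have h1 : (m + 1) / k = m / k := by rw [hdiv1, Nat.div_eq_of_lt (by omega)]; omega
            rw [h0, h1]
            by_cases hij2 : i < j
            · rw [if_pos (by exact_mod_cast hij2), if_pos (by exact_mod_cast (by omega : i < j + 1))]
            · rw [if_neg (by exact_mod_cast hij2), if_neg (by exact_mod_cast (by omega : ¬ i < j + 1))]
        · rw [if_neg hmem, if_neg hmem]
    · rw [List.getElem?_eq_none (by simp [length_chi]; omega),
          List.getElem?_eq_none (by simp [length_chi]; omega)]


-- the small branch (0 < m ≤ k) also computes the closed form
theorem A_small_chi (L : List Int) (hbd : ∀ d ∈ L, 0 ≤ d ∧ d < 7)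
    (m : Nat) (hm : 0 < m) (hmk : m ≤ L.length) :
    (L.take m).foldl (fun dots d => PySem.List.pySetD dots d 1) (List.replicate 7 0)
      = chi L ((m / L.length : Nat) : Int) ((m % L.length : Nat) : Int) := by
  have hk : 0 < L.length := by omega
  apply List.ext_getElem?
  intro p
  by_cases hp : p < 7
  · rw [foldl_ones _ (fun d hd => hbd d (List.mem_of_mem_take hd)) _ (by simp) p,
      getElem?_chi _ _ _ p hp]
    rw [List.getElem?_replicate, if_pos hp]
    unfold chiP
    by_cases hmem : ((p : Nat) : Int) ∈ L
    · rw [if_pos hmem]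
      have hio : List.idxOf ((p : Nat) : Int) L < L.length := List.idxOf_lt_length_iff.mpr hmem
      by_cases hmk2 : m = L.length
      · have h0 : m % L.length = 0 := by rw [hmk2]; exact Nat.mod_self _
        have h1 : m / L.length = 1 := by rw [hmk2]; exact Nat.div_self hk
        rw [if_pos ((List.mem_take_iff_idxOf_lt hmem).mpr (by omega)), h0, h1,
          if_neg (by exact_mod_cast Nat.not_lt_zero _)]
        norm_num
      · have h0 : m % L.length = m := Nat.mod_eq_of_lt (by omega)
        have h1 : m / L.length = 0 := Nat.div_eq_of_lt (by omega)
        rw [h0, h1]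
        by_cases hlt : List.idxOf ((p : Nat) : Int) L < m
        · rw [if_pos ((List.mem_take_iff_idxOf_lt hmem).mpr hlt),
            if_pos (by exact_mod_cast hlt)]
          norm_num
        · rw [if_neg (fun hc => hlt ((List.mem_take_iff_idxOf_lt hmem).mp hc)),
            if_neg (by exact_mod_cast hlt)]
          norm_num
    · rw [if_neg hmem, if_neg (fun hc => hmem (List.mem_of_mem_take hc))]
  · rw [foldl_ones _ (fun d hd => hbd d (List.mem_of_mem_take hd)) _ (by simp) p,
      if_neg (fun hc => by have := hbd _ (List.mem_of_mem_take hc); omega)]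
    rw [List.getElem?_eq_none (by simp; omega),
        List.getElem?_eq_none (by simp [length_chi]; omega)]

-- B's closed-form loop fills in chi
theorem B_chi (L : List Int) (hnd : L.Nodup) (hbd : ∀ d ∈ L, 0 ≤ d ∧ d < 7) (q r : Int) :
    (PySem.List.enumerate L).foldl (fun dots p => PySem.List.pySetD dots p.2 (q + if p.1 < r then 1 else 0))
      (List.replicate 7 0) = chi L q r := by
  apply List.ext_getElem?
  intro p
  by_cases hp : p < 7
  · rw [show PySem.List.enumerate L = PySem.List.enumerate L 0 from rfl,
      foldl_enumerate q r L hnd hbd _ (by simp) 0 p, getElem?_chi _ _ _ p hp]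
    rw [List.getElem?_replicate, if_pos hp]
    unfold chiP
    by_cases hmem : ((p : Nat) : Int) ∈ L
    · rw [if_pos hmem, if_pos hmem, zero_add]
      split <;> norm_num
    · rw [if_neg hmem, if_neg hmem]
  · rw [show PySem.List.enumerate L = PySem.List.enumerate L 0 from rfl,
      foldl_enumerate q r L hnd hbd _ (by simp) 0 p,
      if_neg (fun hc => by have := hbd _ hc; omega)]
    rw [List.getElem?_eq_none (by simp; omega),
        List.getElem?_eq_none (by simp [length_chi]; omega)]

-- ===== VERDICT (by name: the statement is the Claim_ definition above) =====
theorem dots_from_fixed_days_py_spec : Claim_unchanged_dots_from_fixed_days_py := by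
  intro n od _ hnD
  have hnd := pvDays_nodup od
  have hbd := pvDays_bound od
  have hvl := pvDays_length od
  show dots_from_fixed_days_py n od = dots_from_fixed_days_py_alt n od
  simp only [dots_from_fixed_days_py, dots_from_fixed_days_py_alt]
  by_cases hL : pvDays od = []
  · rw [if_pos hL, if_pos (Or.inl hL)]
  · have hk : 0 < (pvDays od).length := List.length_pos_iff.mpr hL
    rw [if_neg hL]
    by_cases hn : n ≤ 0
    · rw [if_pos (Or.inr hn)]
      rw [if_pos (show n ≤ PySem.List.len (pvDays od) by
        rw [PySem.List.len_eq]; omega)]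
      have hsl : PySem.List.slice (pvDays od) none (some n) = [] := by
        rcases lt_or_eq_of_le hn with hlt | he
        · have hle : (pvDays od).length ≤ (-n).toNat := by
            have : ¬ (n < 0 ∧ 0 < ((pvValid od).length : Int) + n) := hnD
            omega
          rw [show n = -(((-n).toNat : Nat) : Int) by omega,
            PySem.List.slice_to_neg_natCast _ _ (by omega)]
          rw [Nat.sub_eq_zero_of_le hle, List.take_zero]
        · subst he
          rw [show (0 : Int) = ((0 : Nat) : Int) by norm_num,
            PySem.List.slice_to_natCast, List.take_zero]
      rw [hsl, List.foldl_nil]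
    · obtain ⟨m, rfl⟩ : ∃ m : Nat, n = (m : Int) :=
        ⟨n.toNat, (Int.toNat_of_nonneg (by omega)).symm⟩
      have hm : 0 < m := by omega
      rw [if_neg (show ¬ (pvDays od = [] ∨ (m : Int) ≤ 0) by
        rintro (h | h); exact hL h; omega)]
      rw [B_chi _ hnd hbd]
      have hq : PySem.Int.floordiv (m : Int) (PySem.List.len (pvDays od))
          = ((m / (pvDays od).length : Nat) : Int) := by
        rw [PySem.List.len_eq]; exact PySem.Int.floordiv_natCast m _
      have hr : PySem.Int.mod (m : Int) (PySem.List.len (pvDays od))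
          = ((m % (pvDays od).length : Nat) : Int) := by
        rw [PySem.List.len_eq]; exact PySem.Int.mod_natCast m _
      rw [hq, hr]
      by_cases hmk : (m : Int) ≤ PySem.List.len (pvDays od)
      · rw [if_pos hmk]
        have hmk' : m ≤ (pvDays od).length := by
          rw [PySem.List.len_eq] at hmk; omega
        rw [show (some ((m : Nat) : Int)) = some (((m : Nat) : Nat) : Int) by norm_num,
          PySem.List.slice_to_natCast]
        exact A_small_chi _ hbd m hm hmk'
      · rw [if_neg hmk]
        exact A_big _ hnd hbd hL m

theorem dots_from_fixed_days_py_changed : Claim_changed_dots_from_fixed_days_py := by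
  unfold Claim_changed_dots_from_fixed_days_py; decide

theorem dots_from_fixed_days_py_tight : Claim_exact_dots_from_fixed_days_py := by
  intro n od _ hD heq
  obtain ⟨hneg, hcnt⟩ := hD
  have hnd := pvDays_nodup od
  have hbd := pvDays_bound od
  have hvl := pvDays_length od
  have hk : 0 < (pvDays od).length := by omega
  have hL : pvDays od ≠ [] := by
    intro h; rw [h] at hk; simp at hk
  -- A's value: small branch over a nonempty negative slice
  have hkk : 0 < (-n).toNat := by omega
  have htk : 0 < (pvDays od).length - (-n).toNat := by omega
  have hA : dots_from_fixed_days_py n od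
      = (PySem.List.slice (pvDays od) none (some n)).foldl
          (fun dots d => PySem.List.pySetD dots d 1) (List.replicate 7 0) := by
    simp only [dots_from_fixed_days_py]
    rw [if_neg hL, if_pos (show n ≤ PySem.List.len (pvDays od) by
      rw [PySem.List.len_eq]; omega)]
  have hB : dots_from_fixed_days_py_alt n od = List.replicate 7 0 := by
    simp only [dots_from_fixed_days_py_alt]
    rw [if_pos (Or.inr (by omega))]
  -- compare at the first listed day
  have hd0 := hbd ((pvDays od)[0]'hk) (List.getElem_mem hk)
  have hp : ((pvDays od)[0]'hk).toNat < 7 := by omega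
  have hmem : ((((pvDays od)[0]'hk).toNat : Nat) : Int)
      ∈ (pvDays od).take ((pvDays od).length - (-n).toNat) := by
    rw [Int.toNat_of_nonneg hd0.1]
    exact (List.mem_take_iff_idxOf_lt (List.getElem_mem hk)).mpr
      (by rw [List.Nodup.idxOf_getElem hnd 0 hk]; omega)
  have h1 : (dots_from_fixed_days_py n od)[((pvDays od)[0]'hk).toNat]? = some 1 := by
    rw [hA, show n = -(((-n).toNat : Nat) : Int) by omega,
      PySem.List.slice_to_neg_natCast _ _ (by omega),
      foldl_ones _ (fun d hd => hbd d (List.mem_of_mem_take hd)) _ (by simp) _,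
      if_pos hmem]
  have h0 : (dots_from_fixed_days_py_alt n od)[((pvDays od)[0]'hk).toNat]? = some 0 := by
    rw [hB, List.getElem?_replicate, if_pos hp]
  rw [heq, h0] at h1
  exact absurd (Option.some.inj h1) (by norm_num)
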